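-- pv_equiv track=rewrite | github.com/stvngo/Assignments | DSC20 Assignments/Homework/hw03.py | new_orders
-- ===== SOURCE A (Python) =====
-- def new_orders(orders, action, dish_name, amount):
--     """
--     Adds or subtracts a given amount of food from a specific dish in
--     a dictionary of orders where keys are strings and values are positive
--     integers.
--
--     >>> orders = {'pizza': 10, 'burger': 5}
--     >>> new_orders(orders, 'add', 'pizza', 5)
--     {'pizza': 15, 'burger': 5}
--
--     >>> new_orders(orders, 'remove', 'burger', 3)
--     {'pizza': 10, 'burger': 2}
--
--     >>> new_orders(orders, 'remove', 'pizza', 15)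
--     {'pizza': 0, 'burger': 5}
--
--     >>> new_orders([], 'remove', 'burger', 3)
--     Traceback (most recent call last):
--     ...
--     AssertionError
--
--     >>> new_orders(orders, 'remove', 'burger', 6)
--     {'pizza': 10, 'burger': 0}
--
--     >>> new_orders(orders, 'remove', 'pizza', 11)
--     {'pizza': 0, 'burger': 5}
--
--     >>> new_orders(orders, 'remove', 'burger', 1.0)
--     Traceback (most recent call last):
--     ...
--     AssertionError
--     """
--     assert isinstance(orders, dict)
--     assert all([isinstance(key, str) for key in orders.keys()])
--     assert all([isinstance(value, int) for value in orders.values()])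
--     assert isinstance(action, str)
--     assert isinstance(dish_name, str)
--     assert isinstance(amount, int)
--     assert amount >= 0
--     updated_orders = {
--         key: (value + amount if action == 'add' and key == dish_name else \
--               max(value - amount, 0) if action == 'remove' and key == \
--                 dish_name else value) for key, value in orders.items()
--                     }
--     return updated_orders
-- ===== SOURCE B (Python) =====
-- def new_orders(orders, action, dish_name, amount):
--     assert isinstance(orders, dict)
--     assert all([isinstance(key, str) for key in orders.keys()])
--     assert all([isinstance(value, int) for value in orders.values()])
--     assert isinstance(action, str)
--     assert isinstance(dish_name, str)
--     assert isinstance(amount, int)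
--     assert amount >= 0
--     items = list(orders.items())
--     if dish_name not in orders or action not in ('add', 'remove'):
--         return dict(items)
--     i = list(orders.keys()).index(dish_name)
--     old = items[i][1]
--     new_value = old + amount if action == 'add' else max(old - amount, 0)
--     return dict(items[:i] + [(dish_name, new_value)] + items[i + 1:])
-- ===== Notes on version B (the rewrite author's own statement) =====
-- stated objective: alternative
-- what changed: Instead of A's per-element conditional dict comprehension that tests action and key on every entry, B locates dish_name's position once with list(keys).index, computes the one new value, and rebuilds the dict by splicing that single updated pair between the untouched item slices items[:i] and items[i+1:] (early return when dish_name is absent or the action is neither add nor remove).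
import Mathlib
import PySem

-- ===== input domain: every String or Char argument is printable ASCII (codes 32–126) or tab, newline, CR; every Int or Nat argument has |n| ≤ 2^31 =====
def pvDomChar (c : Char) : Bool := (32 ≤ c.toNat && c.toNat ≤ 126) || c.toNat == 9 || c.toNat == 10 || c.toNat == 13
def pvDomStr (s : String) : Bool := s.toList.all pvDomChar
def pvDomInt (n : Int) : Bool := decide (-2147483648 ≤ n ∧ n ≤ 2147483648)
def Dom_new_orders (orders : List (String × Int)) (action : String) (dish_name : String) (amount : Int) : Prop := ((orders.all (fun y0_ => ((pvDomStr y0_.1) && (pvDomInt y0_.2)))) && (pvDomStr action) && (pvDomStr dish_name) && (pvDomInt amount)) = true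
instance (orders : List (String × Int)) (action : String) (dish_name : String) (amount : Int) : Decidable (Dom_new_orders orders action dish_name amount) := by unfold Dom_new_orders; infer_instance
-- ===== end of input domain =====

-- B replaces A's per-element conditional dict comprehension by locating dish_name's position with .index and splicing one updated entry between the untouched item slices (alternative decomposition, same O(n) cost).


-- ===== PORT A =====
-- dict comprehension over orders.items(), rebuilding a fresh dict entry by entry
def new_orders (orders : List (String × Int)) (action : String) (dish_name : String) (amount : Int) : List (String × Int) :=
  (orders.foldl
    (fun d p =>
      d.insert p.1
        (if action = "add" ∧ p.1 = dish_name then p.2 + amount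
         else if action = "remove" ∧ p.1 = dish_name then max (p.2 - amount) 0
         else p.2))
    PySem.Dict.empty).items

-- ===== PORT B =====
-- items = list(orders.items()); early return if nothing to do; else i = keys.index(dish_name)
-- and dict(items[:i] + [(dish_name, new_value)] + items[i+1:])
def new_orders_alt (orders : List (String × Int)) (action : String) (dish_name : String) (amount : Int) : List (String × Int) :=
  let D := PySem.Dict.ofList orders
  let items := D.items
  if D.contains dish_name = false ∨ (action ≠ "add" ∧ action ≠ "remove") then
    (PySem.Dict.ofList items).items
  else
    match PySem.List.index? D.keys dish_name with
    | none => (PySem.Dict.ofList items).items  -- unreachable: the guard ensures dish_name is a key, so .index cannot raise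
    | some i =>
        let old := (PySem.List.pyGetD items (i : Int) ("", 0)).2
        let new_value := if action = "add" then old + amount else max (old - amount) 0
        (PySem.Dict.ofList (PySem.List.slice items none (some (i : Int)) ++ [(dish_name, new_value)] ++ PySem.List.slice items (some ((i : Int) + 1)) none)).items

-- ===== PRECONDITION & SPEC =====
-- A's 'assert amount >= 0' raises AssertionError for negative amount; the type asserts hold on every input of this signature.
def Pre_new_orders (orders : List (String × Int)) (action : String) (dish_name : String) (amount : Int) : Prop := 0 ≤ amount
instance (orders : List (String × Int)) (action : String) (dish_name : String) (amount : Int) : Decidable (Pre_new_orders orders action dish_name amount) := by unfold Pre_new_orders; infer_instance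
def pvWitness_new_orders : (List (String × Int)) × String × String × Int := ([("pizza", 10), ("burger", 5)], "add", "pizza", 5)
def Spec_new_orders (orders : List (String × Int)) (action : String) (dish_name : String) (amount : Int) (out : List (String × Int)) : Prop := out = new_orders_alt orders action dish_name amount
instance (orders : List (String × Int)) (action : String) (dish_name : String) (amount : Int) (out : List (String × Int)) : Decidable (Spec_new_orders orders action dish_name amount out) := by unfold Spec_new_orders; infer_instance

-- ===== CLAIM (what is proved, stated in full; the proofs are below) =====
def Claim_equal_new_orders : Prop := ∀ (orders : List (String × Int)) (action : String) (dish_name : String) (amount : Int), Dom_new_orders orders action dish_name amount → Pre_new_orders orders action dish_name amount → Spec_new_orders orders action dish_name amount (new_orders orders action dish_name amount)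

-- ===== LEMMAS AND PROOFS =====

-- applying the per-entry value transform to every stored value commutes with a single insert
theorem pv_mapItems_insert (f : String → Int → Int) (d : PySem.Dict String Int) (k : String) (v : Int) :
    (PySem.Dict.mk (d.items.map (fun p => (p.1, f p.1 p.2)))).insert k (f k v)
      = PySem.Dict.mk ((d.insert k v).items.map (fun p => (p.1, f p.1 p.2))) := by
  apply PySem.Dict.ext
  have hc : ((d.items.map (fun p : String × Int => (p.1, f p.1 p.2))).any fun p => p.1 == k) = d.contains k := by
    simp [PySem.Dict.contains_eq_decide_mem_keys, PySem.Dict.keys, List.any_eq]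
  simp only [PySem.Dict.items_insert, PySem.Dict.contains_mk, hc]
  by_cases h : d.contains k = true
  · simp only [h, if_true, List.map_map]
    refine List.map_congr_left ?_
    intro p _
    by_cases hp : p.1 = k <;> simp [hp]
  · simp only [h]
    simp [Bool.not_eq_true] at h
    simp

-- hence it commutes with A's whole rebuild loop
theorem pv_mapItems_foldl (f : String → Int → Int) (l : List (String × Int)) (d : PySem.Dict String Int) :
    l.foldl (fun d p => d.insert p.1 (f p.1 p.2)) (PySem.Dict.mk (d.items.map (fun p => (p.1, f p.1 p.2))))
      = PySem.Dict.mk ((l.foldl (fun d p => d.insert p.1 p.2) d).items.map (fun p => (p.1, f p.1 p.2))) := by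
  induction l generalizing d with
  | nil => rfl
  | cons p l ih =>
      simp only [List.foldl_cons, pv_mapItems_insert f d p.1 p.2]
      exact ih (d.insert p.1 p.2)

-- dict(items) of a list whose keys are distinct returns exactly that items list
theorem pv_ofList_items (l : List (String × Int)) (h : (l.map Prod.fst).Nodup) :
    (PySem.Dict.ofList l).items = l := by
  show (l.foldl (fun d p => d.insert p.1 p.2) PySem.Dict.empty).items = l
  have := PySem.Dict.items_foldl_insert_fresh (l := l) (k := Prod.fst) (v := Prod.snd)
    (d := PySem.Dict.empty) (by intro a _; rfl) h
  simpa using this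

-- items[len(pre)] of pre ++ x :: suf is x
theorem pv_pyGetD_append (l1 l2 : List (String × Int)) (x d : String × Int) :
    PySem.List.pyGetD (l1 ++ x :: l2) ((l1.length : Nat) : Int) d = x := by
  rw [PySem.List.pyGetD_natCast]
  induction l1 with
  | nil => rfl
  | cons a l ih => simpa using ih

-- mapping a function that fixes the flanks equals splicing its value at the middle position
theorem pv_map_eq_splice (pre suf : List (String × Int)) (x : String × Int)
    (f : String × Int → String × Int)
    (hpre : ∀ p ∈ pre, f p = p) (hsuf : ∀ p ∈ suf, f p = p) :
    (pre ++ x :: suf).map f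
      = (pre ++ x :: suf).take pre.length ++ [f x] ++ (pre ++ x :: suf).drop (pre.length + 1) := by
  have h1 : (pre ++ x :: suf).take pre.length = pre := List.take_left
  have h2 : (pre ++ x :: suf).drop (pre.length + 1) = suf := by
    have hx : pre ++ x :: suf = (pre ++ [x]) ++ suf := by simp
    rw [hx]
    simpa using (List.drop_left : ((pre ++ [x]) ++ suf).drop (pre ++ [x]).length = suf)
  rw [h1, h2, List.map_append, List.map_cons,
      List.map_congr_left hpre, List.map_congr_left hsuf]
  simp

-- ===== VERDICT (by name: the statement is the Claim_ definition above) =====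
theorem new_orders_spec : Claim_equal_new_orders := by
  intro orders action dish_name amount _ _
  unfold Spec_new_orders new_orders new_orders_alt
  -- A's loop rebuilds the dict of orders with the per-entry transform f applied to every value
  refine Eq.trans (congrArg PySem.Dict.items
        (pv_mapItems_foldl
          (fun k v => if action = "add" ∧ k = dish_name then v + amount
            else if action = "remove" ∧ k = dish_name then max (v - amount) 0 else v)
          orders PySem.Dict.empty)) ?_
  show ((PySem.Dict.ofList orders).items.map
      (fun p => (p.1, if action = "add" ∧ p.1 = dish_name then p.2 + amount
        else if action = "remove" ∧ p.1 = dish_name then max (p.2 - amount) 0 else p.2))) = _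
  have hnd : (PySem.Dict.ofList orders).keys.Nodup := PySem.Dict.nodup_keys_ofList orders
  set D := PySem.Dict.ofList orders with hD
  set f : String × Int → String × Int :=
    fun p => (p.1, if action = "add" ∧ p.1 = dish_name then p.2 + amount
      else if action = "remove" ∧ p.1 = dish_name then max (p.2 - amount) 0 else p.2) with hf
  have hkeys : D.items.map Prod.fst = D.keys := rfl
  by_cases hg : D.contains dish_name = false ∨ (action ≠ "add" ∧ action ≠ "remove")
  · -- nothing to do: f fixes every entry, and dict(items) gives back items
    rw [if_pos hg]
    have hid : ∀ p ∈ D.items, f p = p := by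
      intro p hp
      rcases hg with hg | hg
      · have hkd : p.1 ≠ dish_name := by
          intro h
          have hm : p.1 ∈ D.keys := PySem.Dict.mem_keys_of_mem_items _ hp
          rw [PySem.Dict.contains_eq_decide_mem_keys] at hg
          simp at hg
          exact hg (h ▸ hm)
        simp [hf, hkd]
      · simp [hf, hg.1, hg.2]
    rw [List.map_congr_left hid]
    simp only [List.map_id']
    rw [pv_ofList_items D.items (hkeys ▸ hnd)]
  · rw [if_neg hg]
    rw [not_or] at hg
    obtain ⟨hc', hact'⟩ := hg
    have hc : D.contains dish_name = true := by simpa using hc'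
    have hact : action ≠ "add" → action = "remove" := by
      intro ha
      by_cases hr : action = "remove"
      · exact hr
      · exact absurd ⟨ha, hr⟩ hact'
    have hmem : dish_name ∈ D.keys := (PySem.Dict.contains_iff_mem_keys _ _).mp hc
    obtain ⟨i, hidx⟩ := Option.isSome_iff_exists.mp
      ((PySem.List.index?_isSome_iff _ _).mpr hmem)
    rw [hidx]
    obtain ⟨pre, suf, hsplit, hlen, hnp⟩ := (PySem.List.index?_eq_some_iff _ _ _).mp hidx
    -- decompose the items list along the keys decomposition
    have hitems : D.items = pre.map (fun k => (k, D.getD k 0)) ++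
        (dish_name, D.getD dish_name 0) :: suf.map (fun k => (k, D.getD k 0)) := by
      rw [PySem.Dict.items_eq_map_keys D hnd 0, hsplit]
      simp
    have hns : dish_name ∉ suf := by
      have hnd' : (pre ++ dish_name :: suf).Nodup := hsplit ▸ hnd
      exact (List.nodup_cons.mp (List.nodup_append.mp hnd').2.1).1
    have hlen' : (pre.map (fun k => (k, D.getD k 0))).length = i := by simpa using hlen
    -- old value and new value
    have hold : PySem.List.pyGetD D.items ((i : Nat) : Int) ("", 0) = (dish_name, D.getD dish_name 0) := by
      rw [hitems, ← hlen']
      exact pv_pyGetD_append _ _ _ _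
    have hfx : f (dish_name, D.getD dish_name 0)
        = (dish_name, if action = "add" then D.getD dish_name 0 + amount
            else max (D.getD dish_name 0 - amount) 0) := by
      by_cases ha : action = "add"
      · simp [hf, ha]
      · have hr : action = "remove" := hact ha
        simp [hf, hr]
    -- slices are take/drop
    have hsl1 : PySem.List.slice D.items none (some ((i : Nat) : Int)) = D.items.take i :=
      PySem.List.slice_to_natCast _ _
    have hsl2 : PySem.List.slice D.items (some (((i : Nat) : Int) + 1)) none = D.items.drop (i + 1) := by
      have : ((i : Nat) : Int) + 1 = (((i + 1 : Nat) : Nat) : Int) := by push_cast; ring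
      rw [this, PySem.List.slice_from_natCast]
    -- the spliced list
    have hmap : D.items.map f = D.items.take i ++
        [(dish_name, if action = "add" then D.getD dish_name 0 + amount
            else max (D.getD dish_name 0 - amount) 0)] ++ D.items.drop (i + 1) := by
      rw [hitems, ← hlen',
        pv_map_eq_splice _ _ _ f
          (by intro p hp
              obtain ⟨k, hk, rfl⟩ := List.mem_map.mp hp
              have : k ≠ dish_name := fun h => hnp (h ▸ hk)
              simp [hf, this])
          (by intro p hp
              obtain ⟨k, hk, rfl⟩ := List.mem_map.mp hp
              have : k ≠ dish_name := fun h => hns (h ▸ hk)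
              simp [hf, this]),
        hfx]
    -- dict() of the spliced list returns it unchanged: its keys are D.keys
    have hkeq : (D.items.take i ++
        [(dish_name, if action = "add" then D.getD dish_name 0 + amount
            else max (D.getD dish_name 0 - amount) 0)] ++ D.items.drop (i + 1)).map Prod.fst
        = D.keys := by
      rw [hitems, ← hlen', List.take_left]
      have hdrop : (pre.map (fun k => (k, D.getD k 0)) ++ (dish_name, D.getD dish_name 0)
          :: suf.map (fun k => (k, D.getD k 0))).drop ((pre.map (fun k => (k, D.getD k 0))).length + 1)
          = suf.map (fun k => (k, D.getD k 0)) := by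
        have hx : pre.map (fun k => (k, D.getD k 0)) ++ (dish_name, D.getD dish_name 0)
            :: suf.map (fun k => (k, D.getD k 0))
            = (pre.map (fun k => (k, D.getD k 0)) ++ [(dish_name, D.getD dish_name 0)])
              ++ suf.map (fun k => (k, D.getD k 0)) := by simp
        rw [hx]
        simpa using (List.drop_left :
          ((pre.map (fun k => (k, D.getD k 0)) ++ [(dish_name, D.getD dish_name 0)])
            ++ suf.map (fun k => (k, D.getD k 0))).drop
              (pre.map (fun k => (k, D.getD k 0)) ++ [(dish_name, D.getD dish_name 0)]).length
            = suf.map (fun k => (k, D.getD k 0)))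
      rw [hdrop, hsplit]
      simp [List.map_map, Function.comp_def]
    simp only [hold, hsl1, hsl2, hmap]
    exact (pv_ofList_items _ (by rw [hkeq]; exact hnd)).symm
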